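-- pv_equiv track=rewrite | github.com/KayvanShah1/b2b-ecommerce-platform | packages/b2b_ec_sources/src/b2b_ec_sources/lead_gen/core.py | index_existing_clients
-- ===== SOURCE A (Python) =====
-- def index_existing_clients(existing_companies: list[dict]) -> dict[str, dict[str, str | None]]:
--     indexed: dict[str, dict[str, str | None]] = {}
--     ambiguous_names: set[str] = set()
--
--     for company in existing_companies:
--         raw_name = str(company.get("name") or "").strip()
--         if not raw_name:
--             continue
--         key = raw_name.lower()
--         if key in ambiguous_names:
--             continue
--
--         meta = {
--             "name": raw_name,
--             "country_code": str(company.get("country_code") or "").strip().upper() or None,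
--         }
--         if key in indexed:
--             indexed.pop(key, None)
--             ambiguous_names.add(key)
--             continue
--         indexed[key] = meta
--
--     return indexed
-- ===== SOURCE B (Python) =====
-- def index_existing_clients(existing_companies: list[dict]) -> dict[str, dict[str, str | None]]:
--     # Pass 1: frequency of each (non-empty) lowercased name key.
--     counts: dict[str, int] = {}
--     for company in existing_companies:
--         key = str(company.get("name") or "").strip().lower()
--         if key:
--             counts[key] = counts.get(key, 0) + 1
--     # Pass 2: keep exactly the keys appearing once, in first-appearance order.
--     indexed: dict[str, dict[str, str | None]] = {}
--     for company in existing_companies: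
--         raw_name = str(company.get("name") or "").strip()
--         if not raw_name:
--             continue
--         key = raw_name.lower()
--         if counts[key] != 1:
--             continue
--         indexed[key] = {
--             "name": raw_name,
--             "country_code": str(company.get("country_code") or "").strip().upper() or None,
--         }
--     return indexed
-- ===== Notes on version B (the rewrite author's own statement) =====
-- stated objective: alternative
-- what changed: Replaces the single stateful pass (dict with pop + ambiguous-name blacklist) by two stateless passes: first a frequency table of lowercased name keys, then a pass that inserts exactly the keys whose count is 1, in first-appearance order.
import Mathlib
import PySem

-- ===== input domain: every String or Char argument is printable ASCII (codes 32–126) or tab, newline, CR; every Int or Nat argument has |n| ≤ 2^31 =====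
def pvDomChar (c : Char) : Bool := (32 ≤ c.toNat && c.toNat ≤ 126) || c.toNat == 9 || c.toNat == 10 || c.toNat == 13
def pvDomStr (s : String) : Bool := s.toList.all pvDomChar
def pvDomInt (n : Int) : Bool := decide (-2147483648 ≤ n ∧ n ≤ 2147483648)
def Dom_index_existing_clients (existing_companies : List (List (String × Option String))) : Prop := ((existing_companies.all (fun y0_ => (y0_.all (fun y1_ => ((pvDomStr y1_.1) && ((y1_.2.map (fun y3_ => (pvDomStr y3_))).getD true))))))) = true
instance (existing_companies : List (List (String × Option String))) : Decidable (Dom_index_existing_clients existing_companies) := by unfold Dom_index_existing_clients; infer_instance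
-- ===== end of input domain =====

-- B replaces A's single stateful pass (dict with pop + ambiguous-name blacklist) by two stateless
-- passes: a frequency table of the lowercased name keys, then inserting exactly the count-1 keys
-- in first-appearance order (objective: alternative decomposition, same cost).

-- ===== PORT A =====
-- shared helpers: the exact sub-expressions both Pythons compute on a company dict
-- str(company.get(k) or ""): missing key or None or "" all give ""
def pvGetS (company : List (String × Option String)) (k : String) : String :=
  (((PySem.Dict.mk company).get? k).join).getD ""
def pvRaw (company : List (String × Option String)) : String :=
  PySem.Str.strip (pvGetS company "name")
def pvKey (company : List (String × Option String)) : String :=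
  PySem.Str.lower (pvRaw company)
def pvCC (company : List (String × Option String)) : String :=
  PySem.Str.upper (PySem.Str.strip (pvGetS company "country_code"))
def pvMeta (company : List (String × Option String)) : List (String × Option String) :=
  [("name", some (pvRaw company)),
   ("country_code", if pvCC company = "" then none else some (pvCC company))]

def index_existing_clients (existing_companies : List (List (String × Option String))) : List (String × List (String × Option String)) :=
  (existing_companies.foldl
    (fun (st : PySem.Dict String (List (String × Option String)) × PySem.Set String) company =>
      let raw_name := pvRaw company
      if raw_name = "" then st
      else
        let key := PySem.Str.lower raw_name
        if PySem.Set.contains st.2 key then st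
        else
          let m := pvMeta company
          if st.1.contains key then (st.1.erase key, PySem.Set.add st.2 key)  -- pop + blacklist
          else (st.1.insert key m, st.2))
    (PySem.Dict.empty, PySem.Set.empty)).1.items

-- ===== PORT B =====
def index_existing_clients_alt (existing_companies : List (List (String × Option String))) : List (String × List (String × Option String)) :=
  let counts : PySem.Dict String Int :=
    existing_companies.foldl
      (fun d company =>
        let key := pvKey company
        if key = "" then d else d.insert key (d.getD key 0 + 1))
      PySem.Dict.empty
  (existing_companies.foldl
    (fun (indexed : PySem.Dict String (List (String × Option String))) company =>
      let raw_name := pvRaw company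
      if raw_name = "" then indexed
      else
        let key := PySem.Str.lower raw_name
        -- counts[key]: key is always present at this point, so getD is exact
        if counts.getD key 0 ≠ 1 then indexed
        else indexed.insert key (pvMeta company))
    PySem.Dict.empty).items

-- ===== PRECONDITION & SPEC =====
def Spec_index_existing_clients (existing_companies : List (List (String × Option String))) (out : List (String × List (String × Option String))) : Prop := out = index_existing_clients_alt existing_companies
instance (existing_companies : List (List (String × Option String))) (out : List (String × List (String × Option String))) : Decidable (Spec_index_existing_clients existing_companies out) := by unfold Spec_index_existing_clients; infer_instance

-- ===== CLAIM (what is proved, stated in full; the proofs are below) =====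
def Claim_equal_index_existing_clients : Prop := ∀ (existing_companies : List (List (String × Option String))), Dom_index_existing_clients existing_companies → Spec_index_existing_clients existing_companies (index_existing_clients existing_companies)

-- ===== LEMMAS AND PROOFS =====

def pvCnt (l : List (List (String × Option String))) (k : String) : Nat :=
  l.countP (fun c => pvKey c == k)

theorem pvKey_empty (c : List (String × Option String)) (h : pvRaw c = "") : pvKey c = "" := by
  simp [pvKey, h]; rfl

theorem pvKey_ne_empty (c : List (String × Option String)) (h : pvRaw c ≠ "") : pvKey c ≠ "" := by
  intro h'
  apply h
  have h2 := congrArg String.toList h'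
  simp [pvKey, PySem.Str.lower, PySem.Chars.lower] at h2
  exact h2

theorem pvCnt_cons_self (c : List (String × Option String)) (t : List (List (String × Option String))) :
    pvCnt (c :: t) (pvKey c) = pvCnt t (pvKey c) + 1 := by
  simp only [pvCnt, List.countP_cons, beq_self_eq_true]
  simp

theorem pvCnt_cons_ne (c : List (String × Option String)) (t : List (List (String × Option String)))
    (k : String) (h : pvKey c ≠ k) : pvCnt (c :: t) k = pvCnt t k := by
  simp only [pvCnt, List.countP_cons, beq_eq_false_iff_ne.mpr h]
  simp

theorem contains_erase_of_ne (d : PySem.Dict String (List (String × Option String))) (k k' : String)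
    (h : k' ≠ k) : (d.erase k).contains k' = d.contains k' := by
  simp only [PySem.Dict.erase, PySem.Dict.contains, List.any_filter]
  refine List.any_congr rfl (fun a => ?_)
  by_cases ha : a.1 = k' <;> simp [ha, h]

theorem keys_ne_of_contains_false (d : PySem.Dict String (List (String × Option String))) (k : String)
    (h : d.contains k = false) : ∀ kv ∈ d.items, kv.1 ≠ k := by
  simp only [PySem.Dict.contains, List.any_eq_false] at h
  intro kv hm
  simpa using h kv hm

theorem set_contains_add_self (amb : PySem.Set String) (k : String) :
    PySem.Set.contains (PySem.Set.add amb k) k = true := by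
  simp [PySem.Set.add, PySem.Set.contains]
  split <;> simp_all

theorem set_contains_add_ne (amb : PySem.Set String) (k k' : String) (h : k' ≠ k) :
    PySem.Set.contains (PySem.Set.add amb k) k' = PySem.Set.contains amb k' := by
  simp [PySem.Set.add, PySem.Set.contains]
  split <;> simp [h]


def pvStepA (st : PySem.Dict String (List (String × Option String)) × PySem.Set String)
    (c : List (String × Option String)) :
    PySem.Dict String (List (String × Option String)) × PySem.Set String :=
  if pvRaw c = "" then st
  else if PySem.Set.contains st.2 (pvKey c) then st
  else if st.1.contains (pvKey c) then (st.1.erase (pvKey c), PySem.Set.add st.2 (pvKey c))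
  else (st.1.insert (pvKey c) (pvMeta c), st.2)

theorem pvStepA_empty (st) (c : List (String × Option String)) (h : pvRaw c = "") :
    pvStepA st c = st := by rw [pvStepA, if_pos h]

theorem pvStepA_amb (st) (c : List (String × Option String)) (h : pvRaw c ≠ "")
    (h2 : PySem.Set.contains st.2 (pvKey c) = true) :
    pvStepA st c = st := by rw [pvStepA, if_neg h, if_pos h2]

theorem pvStepA_dup (st) (c : List (String × Option String)) (h : pvRaw c ≠ "")
    (h2 : PySem.Set.contains st.2 (pvKey c) = false) (h3 : st.1.contains (pvKey c) = true) :
    pvStepA st c = (st.1.erase (pvKey c), PySem.Set.add st.2 (pvKey c)) := by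
  rw [pvStepA, if_neg h, if_neg (by simpa using h2), if_pos h3]

theorem pvStepA_new (st) (c : List (String × Option String)) (h : pvRaw c ≠ "")
    (h2 : PySem.Set.contains st.2 (pvKey c) = false) (h3 : st.1.contains (pvKey c) = false) :
    pvStepA st c = (st.1.insert (pvKey c) (pvMeta c), st.2) := by
  rw [pvStepA, if_neg h, if_neg (by simpa using h2), if_neg (by simpa using h3)]

theorem A_char (l : List (List (String × Option String)))
    (d : PySem.Dict String (List (String × Option String))) (amb : PySem.Set String)
    (h0 : ∀ kv ∈ d.items, kv.1 ≠ "") :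
    (l.foldl pvStepA (d, amb)).1.items
    = d.items.filter (fun kv => decide (pvCnt l kv.1 = 0) || PySem.Set.contains amb kv.1)
      ++ l.filterMap (fun c =>
          if pvRaw c ≠ "" ∧ PySem.Set.contains amb (pvKey c) = false ∧ d.contains (pvKey c) = false ∧ pvCnt l (pvKey c) = 1
          then some (pvKey c, pvMeta c) else none) := by
  induction l generalizing d amb with
  | nil => simp [pvCnt]
  | cons c t ih =>
    rw [List.foldl_cons]
    by_cases hraw : pvRaw c = ""
    · have hk0 : pvKey c = "" := pvKey_empty c hraw
      rw [pvStepA_empty _ c hraw, ih d amb h0]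
      rw [List.filterMap_cons_none ?hn1]
      case hn1 => exact if_neg (by rintro ⟨h1, -, -, -⟩; exact h1 hraw)
      refine congrArg₂ (· ++ ·) ?_ ?_
      · apply List.filter_congr
        intro kv hm
        rw [pvCnt_cons_ne c t kv.1 (by rw [hk0]; exact (h0 kv hm).symm)]
      · apply List.filterMap_congr
        intro c' hm
        by_cases hr' : pvRaw c' = ""
        · rw [if_neg (by simp [hr']), if_neg (by simp [hr'])]
        · rw [pvCnt_cons_ne c t (pvKey c') (by rw [hk0]; exact (pvKey_ne_empty c' hr').symm)]
    · by_cases hamb : PySem.Set.contains amb (pvKey c) = true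
      · rw [pvStepA_amb _ c hraw hamb, ih d amb h0]
        rw [List.filterMap_cons_none ?hn2]
        case hn2 => exact if_neg (by rintro ⟨-, h2, -, -⟩; rw [hamb] at h2; cases h2)
        refine congrArg₂ (· ++ ·) ?_ ?_
        · apply List.filter_congr
          intro kv hm
          by_cases hk : kv.1 = pvKey c
          · have hmem : pvKey c ∈ amb := by simpa using hamb
            simp [hk, hmem]
          · rw [pvCnt_cons_ne c t kv.1 (fun he => hk he.symm)]
        · apply List.filterMap_congr
          intro c' hm
          by_cases hr' : pvRaw c' = ""
          · rw [if_neg (by simp [hr']), if_neg (by simp [hr'])]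
          · by_cases hk : pvKey c' = pvKey c
            · have hno : ¬(pvRaw c' ≠ "" ∧ PySem.Set.contains amb (pvKey c') = false ∧ d.contains (pvKey c') = false ∧ pvCnt t (pvKey c') = 1) := by
                rintro ⟨-, h2, -, -⟩; rw [hk, hamb] at h2; cases h2
              have hno' : ¬(pvRaw c' ≠ "" ∧ PySem.Set.contains amb (pvKey c') = false ∧ d.contains (pvKey c') = false ∧ pvCnt (c :: t) (pvKey c') = 1) := by
                rintro ⟨-, h2, -, -⟩; rw [hk, hamb] at h2; cases h2
              rw [if_neg hno, if_neg hno']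
            · rw [pvCnt_cons_ne c t (pvKey c') (fun he => hk he.symm)]
      · have hambf : PySem.Set.contains amb (pvKey c) = false := by
          simpa using hamb
        by_cases hcont : d.contains (pvKey c) = true
        · rw [pvStepA_dup _ c hraw hambf hcont]
          rw [ih (d.erase (pvKey c)) (PySem.Set.add amb (pvKey c)) ?h0']
          case h0' =>
            intro kv hm
            have : kv ∈ d.items := by
              simp only [PySem.Dict.erase, List.mem_filter] at hm
              exact hm.1
            exact h0 kv this
          rw [List.filterMap_cons_none ?hn3]
          case hn3 => exact if_neg (by rintro ⟨-, -, h3, -⟩; rw [hcont] at h3; cases h3)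
          refine congrArg₂ (· ++ ·) ?_ ?_
          · show (List.filter _ (List.filter _ d.items)) = _
            rw [List.filter_filter]
            apply List.filter_congr
            intro kv hm
            by_cases hk : kv.1 = pvKey c
            · have hnmem : pvKey c ∉ amb := by simpa using hambf
              simp [hk, hnmem, pvCnt_cons_self]
            · have h1 : (!kv.1 == pvKey c) = true := by simp [hk]
              rw [pvCnt_cons_ne c t kv.1 (fun he => hk he.symm),
                  set_contains_add_ne amb (pvKey c) kv.1 hk]
              simp [h1]
          · apply List.filterMap_congr
            intro c' hm
            by_cases hr' : pvRaw c' = ""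
            · rw [if_neg (by simp [hr']), if_neg (by simp [hr'])]
            · by_cases hk : pvKey c' = pvKey c
              · have hno : ¬(pvRaw c' ≠ "" ∧ PySem.Set.contains (PySem.Set.add amb (pvKey c)) (pvKey c') = false ∧ (d.erase (pvKey c)).contains (pvKey c') = false ∧ pvCnt t (pvKey c') = 1) := by
                  rintro ⟨-, h2, -, -⟩; rw [hk, set_contains_add_self] at h2; cases h2
                have hno' : ¬(pvRaw c' ≠ "" ∧ PySem.Set.contains amb (pvKey c') = false ∧ d.contains (pvKey c') = false ∧ pvCnt (c :: t) (pvKey c') = 1) := by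
                  rintro ⟨-, -, h3, -⟩; rw [hk, hcont] at h3; cases h3
                rw [if_neg hno, if_neg hno']
              · rw [pvCnt_cons_ne c t (pvKey c') (fun he => hk he.symm),
                    set_contains_add_ne amb (pvKey c) (pvKey c') hk,
                    contains_erase_of_ne d (pvKey c) (pvKey c') hk]
        · have hcontf : d.contains (pvKey c) = false := by simpa using hcont
          rw [pvStepA_new _ c hraw hambf hcontf]
          rw [ih (d.insert (pvKey c) (pvMeta c)) amb ?h0'']
          case h0'' =>
            intro kv hm
            rw [PySem.Dict.items_insert_of_not_contains d (pvMeta c) hcontf] at hm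
            rcases List.mem_append.mp hm with h | h
            · exact h0 kv h
            · simp at h
              rw [h]
              exact pvKey_ne_empty c hraw
          rw [PySem.Dict.items_insert_of_not_contains d (pvMeta c) hcontf,
              List.filter_append]
          have hkeys := keys_ne_of_contains_false d (pvKey c) hcontf
          have hfilter : d.items.filter (fun kv => decide (pvCnt t kv.1 = 0) || PySem.Set.contains amb kv.1)
              = d.items.filter (fun kv => decide (pvCnt (c :: t) kv.1 = 0) || PySem.Set.contains amb kv.1) := by
            apply List.filter_congr
            intro kv hm
            rw [pvCnt_cons_ne c t kv.1 (fun he => (hkeys kv hm) he.symm)]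
          rw [hfilter, List.append_assoc]
          refine congrArg₂ (· ++ ·) rfl ?_
          have hcnt1 : pvCnt (c :: t) (pvKey c) = pvCnt t (pvKey c) + 1 := pvCnt_cons_self c t
          have htail : List.filterMap (fun c' =>
              if pvRaw c' ≠ "" ∧ PySem.Set.contains amb (pvKey c') = false ∧ (d.insert (pvKey c) (pvMeta c)).contains (pvKey c') = false ∧ pvCnt t (pvKey c') = 1
              then some (pvKey c', pvMeta c') else none) t
            = List.filterMap (fun c' =>
              if pvRaw c' ≠ "" ∧ PySem.Set.contains amb (pvKey c') = false ∧ d.contains (pvKey c') = false ∧ pvCnt (c :: t) (pvKey c') = 1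
              then some (pvKey c', pvMeta c') else none) t := by
            apply List.filterMap_congr
            intro c' hm
            by_cases hr' : pvRaw c' = ""
            · rw [if_neg (by simp [hr']), if_neg (by simp [hr'])]
            · by_cases hk : pvKey c' = pvKey c
              · have hge : 1 ≤ pvCnt t (pvKey c) := by
                  apply List.countP_pos_iff.mpr
                  exact ⟨c', hm, by simp [hk]⟩
                have hno : ¬(pvRaw c' ≠ "" ∧ PySem.Set.contains amb (pvKey c') = false ∧ (d.insert (pvKey c) (pvMeta c)).contains (pvKey c') = false ∧ pvCnt t (pvKey c') = 1) := by
                  rintro ⟨-, -, h3, -⟩; rw [hk, PySem.Dict.contains_insert_self] at h3; cases h3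
                have hno' : ¬(pvRaw c' ≠ "" ∧ PySem.Set.contains amb (pvKey c') = false ∧ d.contains (pvKey c') = false ∧ pvCnt (c :: t) (pvKey c') = 1) := by
                  rintro ⟨-, -, -, h4⟩; rw [hk, hcnt1] at h4; omega
                rw [if_neg hno, if_neg hno']
              · rw [PySem.Dict.contains_insert, beq_eq_false_iff_ne.mpr hk]
                rw [pvCnt_cons_ne c t (pvKey c') (fun he => hk he.symm)]
                simp only [Bool.false_or]
          by_cases hz : pvCnt t (pvKey c) = 0
          · rw [List.filterMap_cons_some (b := (pvKey c, pvMeta c)) ?hs]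
            case hs => exact if_pos ⟨hraw, hambf, hcontf, by rw [hcnt1, hz]⟩
            rw [htail]
            have hnmem : pvKey c ∉ amb := by simpa using hambf
            simp [hz, hnmem]
          · rw [List.filterMap_cons_none ?hn4]
            case hn4 => exact if_neg (by rintro ⟨-, -, -, h4⟩; rw [hcnt1] at h4; omega)
            rw [htail]
            have hnmem : pvKey c ∉ amb := by simpa using hambf
            simp [hz, hnmem]


theorem counts_getD (l : List (List (String × Option String))) (d : PySem.Dict String Int)
    (k : String) (hk : k ≠ "") :
    (l.foldl (fun d company =>
        let key := pvKey company
        if key = "" then d else d.insert key (d.getD key 0 + 1)) d).getD k 0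
      = d.getD k 0 + (pvCnt l k : Int) := by
  induction l generalizing d with
  | nil => simp [pvCnt]
  | cons c t ih =>
    simp only [List.foldl_cons]
    by_cases h : pvKey c = ""
    · rw [if_pos h, ih _, pvCnt_cons_ne c t k (by rw [h]; exact fun he => hk he.symm)]
    · rw [if_neg h, ih _]
      by_cases he : pvKey c = k
      · subst he
        rw [PySem.Dict.getD_insert_self, pvCnt_cons_self]
        push_cast; ring
      · rw [PySem.Dict.getD_insert_of_ne _ _ _ (Ne.symm he), pvCnt_cons_ne c t k he]


-- proof-side handles on B's two passes
def pvCounts (l : List (List (String × Option String))) : PySem.Dict String Int :=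
  l.foldl (fun d company =>
    let key := pvKey company
    if key = "" then d else d.insert key (d.getD key 0 + 1)) PySem.Dict.empty

def pvPass (l : List (List (String × Option String))) (c : List (String × Option String)) : Bool :=
  decide (pvRaw c ≠ "") && decide (pvCnt l (pvKey c) = 1)

theorem pvPass_nodup (l : List (List (String × Option String))) :
    ((l.filter (pvPass l)).map pvKey).Nodup := by
  rw [List.nodup_iff_count_le_one]
  intro a
  rcases Nat.eq_zero_or_pos (List.count a ((l.filter (pvPass l)).map pvKey)) with h | h
  · omega
  · have hmem := List.count_pos_iff.mp h
    obtain ⟨c0, hc0, rfl⟩ := List.mem_map.mp hmem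
    have hp := (List.mem_filter.mp hc0).2
    have h2 : pvCnt l (pvKey c0) = 1 := by
      simp only [pvPass, Bool.and_eq_true, decide_eq_true_eq] at hp
      exact hp.2
    have hle : List.count (pvKey c0) ((l.filter (pvPass l)).map pvKey)
        ≤ List.count (pvKey c0) (l.map pvKey) :=
      List.Sublist.count_le _ (List.Sublist.map pvKey List.filter_sublist)
    have hcount : List.count (pvKey c0) (l.map pvKey) = pvCnt l (pvKey c0) := by
      rw [List.count_eq_countP, List.countP_map]
      rfl
    omega

theorem B_char (l : List (List (String × Option String))) :
    index_existing_clients_alt l = (l.filter (pvPass l)).map (fun c => (pvKey c, pvMeta c)) := by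
  have hstep : (fun (r : PySem.Dict String (List (String × Option String))) c =>
        if pvRaw c = "" then r
        else if (pvCounts l).getD (PySem.Str.lower (pvRaw c)) 0 ≠ 1 then r
        else r.insert (PySem.Str.lower (pvRaw c)) (pvMeta c))
      = (fun (r : PySem.Dict String (List (String × Option String))) c =>
          if pvPass l c = true then r.insert (pvKey c) (pvMeta c) else r) := by
    funext r c
    by_cases h1 : pvRaw c = ""
    · have hpf : pvPass l c = false := by simp [pvPass, h1]
      rw [if_pos h1, hpf]
      simp
    · have hkl : PySem.Str.lower (pvRaw c) = pvKey c := rfl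
      have hkey : (pvCounts l).getD (pvKey c) 0 = (pvCnt l (pvKey c) : Int) := by
        have hcg := counts_getD l PySem.Dict.empty (pvKey c) (pvKey_ne_empty c h1)
        simpa [pvCounts] using hcg
      rw [if_neg h1, hkl, hkey]
      by_cases h2 : pvCnt l (pvKey c) = 1
      · rw [if_neg (by rw [h2]; simp), if_pos (by simp [pvPass, h1, h2])]
      · rw [if_pos (fun hx => h2 (by exact_mod_cast hx)),
            if_neg (by simp [pvPass, h2])]
  have h1 : index_existing_clients_alt l
      = (l.foldl (fun (r : PySem.Dict String (List (String × Option String))) c =>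
          if pvPass l c = true then r.insert (pvKey c) (pvMeta c) else r) PySem.Dict.empty).items := by
    show (l.foldl (fun (r : PySem.Dict String (List (String × Option String))) c =>
        if pvRaw c = "" then r
        else if (pvCounts l).getD (PySem.Str.lower (pvRaw c)) 0 ≠ 1 then r
        else r.insert (PySem.Str.lower (pvRaw c)) (pvMeta c)) PySem.Dict.empty).items = _
    rw [hstep]
  rw [h1, ← List.foldl_filter,
      PySem.Dict.items_foldl_insert_fresh (l.filter (pvPass l)) pvKey pvMeta PySem.Dict.empty
        (fun a _ => rfl) (pvPass_nodup l)]
  rfl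

-- glue: filterMap of an if-some is map over filter
theorem filterMap_if_eq_map_filter {α β : Type} (l : List α) (p : α → Prop) [DecidablePred p] (g : α → β) :
    l.filterMap (fun c => if p c then some (g c) else none)
      = (l.filter (fun c => decide (p c))).map g := by
  induction l with
  | nil => rfl
  | cons x t ih => by_cases h : p x <;> simp [h, ih]

-- ===== VERDICT (by name: the statement is the Claim_ definition above) =====
theorem index_existing_clients_spec : Claim_equal_index_existing_clients := by
  intro l _hdom
  unfold Spec_index_existing_clients
  rw [B_char l]
  have hA : index_existing_clients l
      = (l.foldl pvStepA (PySem.Dict.empty, PySem.Set.empty)).1.items := rfl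
  rw [hA, A_char l PySem.Dict.empty PySem.Set.empty (by intro kv hm; cases hm)]
  have hcond : ∀ c ∈ l,
      (if pvRaw c ≠ "" ∧ PySem.Set.contains PySem.Set.empty (pvKey c) = false
          ∧ (PySem.Dict.empty : PySem.Dict String (List (String × Option String))).contains (pvKey c) = false ∧ pvCnt l (pvKey c) = 1
       then some (pvKey c, pvMeta c) else none)
      = (if pvRaw c ≠ "" ∧ pvCnt l (pvKey c) = 1
         then some (pvKey c, pvMeta c) else none) := by
    intro c _
    by_cases hr : pvRaw c = ""
    · rw [if_neg (by rintro ⟨h, -⟩; exact h hr), if_neg (by rintro ⟨h, -⟩; exact h hr)]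
    · by_cases h2 : pvCnt l (pvKey c) = 1
      · rw [if_pos ⟨hr, rfl, PySem.Dict.contains_empty _, h2⟩, if_pos ⟨hr, h2⟩]
      · rw [if_neg (by rintro ⟨-, -, -, h⟩; exact h2 h), if_neg (by rintro ⟨-, h⟩; exact h2 h)]
  rw [List.filterMap_congr hcond,
      filterMap_if_eq_map_filter l (fun c => pvRaw c ≠ "" ∧ pvCnt l (pvKey c) = 1)
        (fun c => (pvKey c, pvMeta c))]
  have hfe : (fun c => decide (pvRaw c ≠ "" ∧ pvCnt l (pvKey c) = 1)) = pvPass l := by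
    funext c
    simp [pvPass]
  rw [hfe]
  simp
  intro a b h
  cases h
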